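-- pv_equiv track=rewrite | github.com/vtphatt2/Vi2En-ancient-texts-T5 | extract_data/prison_diary_vi.py | postprocess_poem
-- ===== SOURCE A (Python) =====
-- def postprocess_poem(text):
--     punctuation_list = [".", ",", ":", ";", "!", "?"]
--     processed_lines = []
--
--     for line in text:
--         words = line.strip().split()
--         if not words:
--             processed_lines.append(line)
--             continue
--
--         pattern = None
--         result_words = []
--         word_count = 0
--
--         for w in words:
--             word_count += 1
--             # Check if the current word ends with punctuation
--             last_char = w[-1]
--
--             if last_char in punctuation_list:
--                 # Determine the pattern if not already set
--                 if pattern is None: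
--                     if word_count == 7:
--                         pattern = 7
--                     elif word_count == 5:
--                         pattern = 5
--                     else:
--                         # Default to 7 if not exactly at 5 or 7
--                         pattern = 7
--
--                 # Append the word
--                 result_words.append(w)
--
--                 # If the current word_count matches a multiple of the pattern,
--                 # insert a newline after this word.
--                 if word_count % pattern == 0:
--                     # Add a newline after this punctuation
--                     result_words[-1] += '\n'
--             else:
--                 # Just a normal word
--                 result_words.append(w)
--
--         # Join the processed words for this line
--         processed_line = ' '.join(result_words)
--         processed_lines.append(processed_line)
--
--     # Return the processed lines joined by newline
--     # The user can handle the final newline outside if they want.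
--     return processed_lines
-- ===== SOURCE B (Python) =====
-- def postprocess_poem(text):
--     puncts = ".,:;!?"
--     processed_lines = []
--     for line in text:
--         words = line.strip().split()
--         if not words:
--             processed_lines.append(line)
--             continue
--         # count leading words without trailing punctuation; first punctuated word
--         # is 1-based position lead+1, so the period is 5 iff lead == 4
--         lead = 0
--         while lead < len(words) and words[lead][-1] not in puncts:
--             lead += 1
--         pattern = 5 if lead == 4 else 7
--         # slice the words into blocks of `pattern`; a full block whose last word
--         # is punctuated gets '\n' appended to that word
--         pieces = []
--         for i in range(0, len(words), pattern):
--             block = words[i:i + pattern]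
--             if len(block) == pattern and block[-1][-1] in puncts:
--                 block = block[:-1] + [block[-1] + '\n']
--             pieces.append(' '.join(block))
--         processed_lines.append(' '.join(pieces))
--     return processed_lines
-- ===== Notes on version B (the rewrite author's own statement) =====
-- stated objective: alternative
-- what changed: A makes one stateful pass per line with a word counter, a pattern variable fixed mid-loop and a per-word modulo test; B first counts the leading unpunctuated words to fix the block size (5 iff exactly 4 of them, else 7), then slices the word list into blocks of that size and appends '\n' to the last word of each full block that ends in punctuation, joining block strings.
import Mathlib
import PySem

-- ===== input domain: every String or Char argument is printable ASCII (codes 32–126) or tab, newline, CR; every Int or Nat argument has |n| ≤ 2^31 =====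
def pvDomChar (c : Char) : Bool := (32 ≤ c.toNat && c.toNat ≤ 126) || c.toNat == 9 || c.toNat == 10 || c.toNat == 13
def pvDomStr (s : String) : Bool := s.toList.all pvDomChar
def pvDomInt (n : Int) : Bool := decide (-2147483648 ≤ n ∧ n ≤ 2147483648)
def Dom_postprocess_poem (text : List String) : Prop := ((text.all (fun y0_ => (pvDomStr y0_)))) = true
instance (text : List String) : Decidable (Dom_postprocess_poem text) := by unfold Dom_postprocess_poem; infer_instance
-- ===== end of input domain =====

-- B replaces A's single stateful pass (mutable pattern, counter, mod test per word) by
-- counting the leading unpunctuated words to fix the block size, slicing the word list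
-- into blocks of that size, and newline-marking the last word of each full punctuated
-- block (objective: alternative; same cost).

-- shared constant and the test 'w[-1] in punctuation' both Pythons perform on a word
def pvPunct : List Char := ['.', ',', ':', ';', '!', '?']
def pvEndsP (w : List Char) : Bool := (PySem.List.pyGet? w (-1)).any (fun c => pvPunct.contains c)

-- ===== PORT A =====
-- one iteration of A's inner 'for w in words' loop; state = (pattern, result_words, word_count)
def pvStepA (s : Option Int × List (List Char) × Int) (w : List Char) :
    Option Int × List (List Char) × Int :=
  let word_count := s.2.2 + 1
  -- last_char = w[-1]; 'if last_char in punctuation_list' (w from split() is never empty)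
  if pvEndsP w then
    let pattern : Int :=
      match s.1 with
      | some p => p
      | none => if word_count = 7 then 7 else if word_count = 5 then 5 else 7
    if PySem.Int.mod word_count pattern = 0 then
      -- result_words.append(w); result_words[-1] += '\n'
      (some pattern, s.2.1 ++ [w ++ ['\n']], word_count)
    else
      (some pattern, s.2.1 ++ [w], word_count)
  else
    (s.1, s.2.1 ++ [w], word_count)

def postprocess_poem (text : List String) : List String :=
  text.foldl (fun processed_lines line =>
    let words := PySem.Chars.split₀ (PySem.Chars.strip line.toList)
    if words = [] then processed_lines ++ [line]
    else
      let res := words.foldl pvStepA (none, [], 0)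
      processed_lines ++ [String.ofList (PySem.Chars.join [' '] res.2.1)]) []

-- ===== PORT B =====
-- B's 'while lead < len(words) and words[lead][-1] not in puncts: lead += 1',
-- as the obvious structural recursion counting the leading unpunctuated words
def pvLead : List (List Char) → Nat
  | [] => 0
  | w :: ws => if pvEndsP w then 0 else pvLead ws + 1

-- body of B's 'for i in range(0, len(words), pattern)' loop: 'block = words[i:i+pattern];
-- if len(block) == pattern and block[-1][-1] in puncts: block = block[:-1] + [block[-1] + "\n"]'
-- (inside the branch len(block) = pattern > 0, so block[-1] exists; the getD [] is never taken)
def pvBlockFix (pattern : Int) (block : List (List Char)) : List (List Char) :=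
  if ((block.length : Int) == pattern) && ((PySem.List.pyGet? block (-1)).any pvEndsP) then
    PySem.List.slice block none (some (-1)) ++ [((PySem.List.pyGet? block (-1)).getD []) ++ ['\n']]
  else block

def postprocess_poem_alt (text : List String) : List String :=
  text.foldl (fun processed_lines line =>
    let words := PySem.Chars.split₀ (PySem.Chars.strip line.toList)
    if words = [] then processed_lines ++ [line]
    else
      let pattern : Int := if pvLead words = 4 then 5 else 7
      let pieces := (PySem.List.pyRange 0 (words.length : Int) pattern).foldl
        (fun pieces i =>
          pieces ++ [PySem.Chars.join [' ']
            (pvBlockFix pattern (PySem.List.slice words (some i) (some (i + pattern))))]) []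
      processed_lines ++ [String.ofList (PySem.Chars.join [' '] pieces)]) []

-- ===== PRECONDITION & SPEC =====
def Spec_postprocess_poem (text : List String) (out : List String) : Prop := out = postprocess_poem_alt text
instance (text : List String) (out : List String) : Decidable (Spec_postprocess_poem text out) := by unfold Spec_postprocess_poem; infer_instance

-- ===== CLAIM (what is proved, stated in full; the proofs are below) =====
def Claim_equal_postprocess_poem : Prop := ∀ (text : List String), Dom_postprocess_poem text → Spec_postprocess_poem text (postprocess_poem text)

-- ===== LEMMAS AND PROOFS =====

-- the per-word marking A's loop performs, with 1-based positions starting at k+1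
def pvMark (p : Int) (k : Nat) (l : List (List Char)) : List (List Char) :=
  (l.zipIdx (k+1)).map (fun wi =>
    if pvEndsP wi.1 && (PySem.Int.mod (wi.2 : Int) p == 0) then wi.1 ++ ['\n'] else wi.1)

lemma pvGetLast {α : Type} (l : List α) (h : l ≠ []) : PySem.List.pyGet? l (-1) = some (l.getLast h) := by
  have hl : 0 < l.length := List.length_pos_iff.mpr h
  simp only [PySem.List.pyGet?, PySem.List.pyIdx?]
  rw [if_neg (by omega), if_pos (by simp; omega)]
  simp only [Option.bind_some, show (- -(1:Int)).toNat = 1 from rfl]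
  rw [List.getLast_eq_getElem, List.getElem?_eq_getElem (by omega)]

lemma pvMark_length (p : Int) (k : Nat) (l : List (List Char)) :
    (pvMark p k l).length = l.length := by
  simp [pvMark]

lemma pvMark_getElem (p : Int) (k : Nat) (l : List (List Char)) (i : Nat)
    (hi : i < l.length) :
    (pvMark p k l)[i]'(by rw [pvMark_length]; exact hi) =
      if pvEndsP l[i] && (PySem.Int.mod ((k + 1 + i : Nat) : Int) p == 0)
      then l[i] ++ ['\n'] else l[i] := by
  simp [pvMark]

lemma pvModNe (p j : Int) (hp : 0 < p) (h1 : 1 ≤ j) (h2 : j < p) :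
    ¬ (PySem.Int.mod j p = 0) := by
  rw [PySem.Int.mod_eq_emod_of_pos hp, Int.emod_eq_of_lt (by omega) h2]
  omega

lemma pvMark_append (p : Int) (k : Nat) (a b : List (List Char)) :
    pvMark p k (a ++ b) = pvMark p k a ++ pvMark p (k + a.length) b := by
  simp only [pvMark, List.zipIdx_append, List.map_append]
  congr 3
  omega

lemma pvMark_shift (p : Int) (hp : 0 < p) (k : Nat) (l : List (List Char)) :
    pvMark p (k + p.toNat) l = pvMark p k l := by
  apply List.ext_getElem (by rw [pvMark_length, pvMark_length])
  intro i h1 h2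
  rw [pvMark_length] at h1
  rw [pvMark_getElem _ _ _ i h1, pvMark_getElem _ _ _ i h1]
  have hmod : PySem.Int.mod ((k + p.toNat + 1 + i : Nat) : Int) p
      = PySem.Int.mod ((k + 1 + i : Nat) : Int) p := by
    rw [show ((k + p.toNat + 1 + i : Nat) : Int) = ((k + 1 + i : Nat) : Int) + p * 1 by
      push_cast; omega]
    rw [PySem.Int.mod_eq_emod_of_pos hp, PySem.Int.mod_eq_emod_of_pos hp,
        Int.add_mul_emod_self_left]
  rw [hmod]

lemma pvBlockFix_eq_mark (p : Int) (hp : 0 < p) (l : List (List Char))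
    (hlen : l.length ≤ p.toNat) :
    pvBlockFix p l = pvMark p 0 l := by
  by_cases hnil : l = []
  · subst hnil; simp [pvBlockFix, pvMark, PySem.List.pyGet?, PySem.List.pyIdx?]
  have hlpos : 0 < l.length := List.length_pos_iff.mpr hnil
  have hget := pvGetLast l hnil
  by_cases hfull : (l.length : Int) = p
  · by_cases hpunct : pvEndsP (l.getLast hnil)
    · -- full punctuated block: last word gets the newline
      rw [pvBlockFix, hget, if_pos (by simp [hfull, hpunct]), PySem.List.slice_to_neg_one]
      apply List.ext_getElem (by simp [pvMark_length]; omega)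
      intro i h1 h2
      rw [pvMark_length] at h2
      rw [pvMark_getElem _ _ _ i h2]
      by_cases hlast : i = l.length - 1
      · subst hlast
        rw [List.getElem_append_right (by simp only [List.length_dropLast]; omega)]
        have hEq : ((0 + 1 + (l.length - 1) : Nat) : Int) = p := by omega
        rw [List.getLast_eq_getElem] at hpunct
        simp only [List.length_dropLast, Option.getD_some, hEq]
        rw [if_pos (by simp [hpunct, PySem.Int.mod_eq_emod_of_pos hp])]
        simp [List.getLast_eq_getElem]
      · have hi' : i < l.length - 1 := by
          omega
        rw [List.getElem_append_left (by simp only [List.length_dropLast]; omega),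
            List.getElem_dropLast]
        rw [if_neg (by
          have := pvModNe p ((0 + 1 + i : Nat) : Int) hp (by omega) (by omega)
          simp only [Bool.and_eq_true, beq_iff_eq]
          tauto)]
    · -- full block, last word unpunctuated: nothing marked
      rw [pvBlockFix, hget, if_neg (by simp [hpunct])]
      apply List.ext_getElem (by rw [pvMark_length])
      intro i h1 h2
      rw [pvMark_getElem _ _ _ i h1]
      by_cases hlast : i = l.length - 1
      · subst hlast
        rw [List.getLast_eq_getElem] at hpunct
        rw [if_neg (by simp [hpunct])]
      · rw [if_neg (by
          have := pvModNe p ((0 + 1 + i : Nat) : Int) hp (by omega) (by omega)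
          simp only [Bool.and_eq_true, beq_iff_eq]
          tauto)]
  · -- short block: no position is a multiple of p
    rw [pvBlockFix, if_neg (by simp [hfull])]
    apply List.ext_getElem (by rw [pvMark_length])
    intro i h1 h2
    rw [pvMark_getElem _ _ _ i h1]
    rw [if_neg (by
      have := pvModNe p ((0 + 1 + i : Nat) : Int) hp (by omega) (by omega)
      simp only [Bool.and_eq_true, beq_iff_eq]
      tauto)]

lemma pvRange_cons (a b p : Int) (hp : 0 < p) (hab : a < b) :
    PySem.List.pyRange a b p = a :: PySem.List.pyRange (a + p) b p := by
  rw [PySem.List.pyRange_of_pos _ _ hp, PySem.List.pyRange_of_pos _ _ hp]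
  by_cases h2 : a + p < b
  · rw [if_pos hab, if_pos h2]
    have hdiv : (b - a + p - 1) / p = (b - (a + p) + p - 1) / p + 1 := by
      rw [show b - a + p - 1 = (b - (a + p) + p - 1) + p * 1 by ring,
          Int.add_mul_ediv_left _ _ (by omega : p ≠ 0)]
    have hpos : 0 ≤ (b - (a + p) + p - 1) / p := Int.ediv_nonneg (by omega) (by omega)
    rw [hdiv, Int.toNat_add hpos (by omega), show Int.toNat 1 = 1 from rfl,
        List.range_succ_eq_map]
    simp only [List.map_cons, List.map_map, Nat.cast_zero, mul_zero, add_zero]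
    congr 1
    apply List.map_congr_left
    intro k _
    simp only [Function.comp_apply, Nat.cast_succ]
    ring
  · rw [if_pos hab, if_neg h2]
    have h1 : (b - a + p - 1) / p = 1 := by
      have hlo : 1 ≤ (b - a + p - 1) / p := by
        rw [Int.le_ediv_iff_mul_le hp]; omega
      have hhi : (b - a + p - 1) / p < 2 :=
        (Int.ediv_lt_iff_lt_mul hp).mpr (by omega)
      omega
    rw [h1]
    simp

lemma pvRange_shift (b p : Int) (hp : 0 < p) :
    PySem.List.pyRange p b p = (PySem.List.pyRange 0 (b - p) p).map (fun x => p + x) := by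
  rw [PySem.List.pyRange_of_pos _ _ hp, PySem.List.pyRange_of_pos _ _ hp]
  have hiff : p < b ↔ 0 < b - p := by omega
  by_cases h : p < b
  · rw [if_pos h, if_pos (by omega)]
    rw [show b - p + p - 1 = b - p - 0 + p - 1 by ring]
    rw [List.map_map]
    apply List.map_congr_left
    intro k _
    simp only [Function.comp_apply]
    ring
  · rw [if_neg h, if_neg (by omega)]
    simp

lemma pvJoin_cons (sep x : List Char) (R : List (List Char)) (hR : R ≠ []) :
    PySem.Chars.join sep (x :: R) = x ++ sep ++ PySem.Chars.join sep R := by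
  cases R with
  | nil => exact absurd rfl hR
  | cons b R => rw [PySem.Chars.join_cons_cons]

lemma pvJoin_append (sep : List Char) (xs ys : List (List Char)) (hx : xs ≠ []) (hy : ys ≠ []) :
    PySem.Chars.join sep (xs ++ ys) = PySem.Chars.join sep xs ++ sep ++ PySem.Chars.join sep ys := by
  induction xs with
  | nil => exact absurd rfl hx
  | cons a xs ih =>
    cases xs with
    | nil => rw [List.singleton_append, pvJoin_cons _ _ _ hy, PySem.Chars.join_singleton]
    | cons a' xs' =>
      rw [List.cons_append, List.cons_append, PySem.Chars.join_cons_cons,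
          PySem.Chars.join_cons_cons, ← List.cons_append, ih (by simp)]
      simp [List.append_assoc]

lemma pvKey (p : Int) (hp : 0 < p) :
    ∀ (n : Nat) (words : List (List Char)), words.length ≤ n → words ≠ [] →
      PySem.Chars.join [' ']
        ((PySem.List.pyRange 0 (words.length : Int) p).map (fun i =>
          PySem.Chars.join [' '] (pvBlockFix p (PySem.List.slice words (some i) (some (i + p)))))) =
      PySem.Chars.join [' '] (pvMark p 0 words) := by
  intro n
  induction n with
  | zero => intro words hlen hne; exact absurd (List.eq_nil_of_length_eq_zero (by omega)) hne
  | succ n ih =>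
    intro words hlen hne
    have hwpos : 0 < words.length := List.length_pos_iff.mpr hne
    have hslice0 : PySem.List.slice words (some (0 : Int)) (some (0 + p)) = words.take p.toNat := by
      rw [zero_add, PySem.List.slice_toNat _ le_rfl (le_of_lt hp)]
      simp
    by_cases hd : words.drop p.toNat = []
    · -- a single (possibly short) block
      have hl : words.length ≤ p.toNat := by
        have := List.length_drop (l := words) (i := p.toNat)
        rw [hd] at this; simp at this; omega
      have htail : PySem.List.pyRange (0 + p) (words.length : Int) p = [] := by
        rw [PySem.List.pyRange_of_pos _ _ hp, if_neg (by omega)]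
        simp
      rw [pvRange_cons 0 _ p hp (by exact_mod_cast hwpos), htail, List.map_cons, List.map_nil,
          PySem.Chars.join_singleton, hslice0, List.take_of_length_le hl,
          pvBlockFix_eq_mark p hp words hl]
    · -- a full first block followed by the rest
      have hplen : p.toNat < words.length := by
        by_contra hc
        exact hd (List.drop_eq_nil_of_le (by omega))
      set t := words.take p.toNat with ht
      set d := words.drop p.toNat with hdd
      have htlen : t.length = p.toNat := by
        rw [ht, List.length_take]; omega
      have hdlen : d.length = words.length - p.toNat := by
        rw [hdd, List.length_drop]
      have htne : t ≠ [] := by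
        intro h
        have := congrArg List.length h
        rw [htlen] at this; simp at this; omega
      have hcast : ((words.length : Int) - p) = (d.length : Int) := by
        omega
      -- peel the first range element and shift the rest
      rw [pvRange_cons 0 _ p hp (by exact_mod_cast hwpos), zero_add,
          pvRange_shift _ p hp, hcast, List.map_cons, List.map_map, hslice0]
      -- the shifted tail is exactly the block map over d
      have hmapeq : ((PySem.List.pyRange 0 (d.length : Int) p).map
            ((fun i => PySem.Chars.join [' ']
              (pvBlockFix p (PySem.List.slice words (some i) (some (i + p))))) ∘ (fun x => p + x))) =
          ((PySem.List.pyRange 0 (d.length : Int) p).map (fun i =>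
            PySem.Chars.join [' '] (pvBlockFix p (PySem.List.slice d (some i) (some (i + p)))))) := by
        apply List.map_congr_left
        intro i hi
        have hi0 : 0 ≤ i := by
          have := (PySem.List.mem_pyRange_iff_of_pos hp i).mp hi
          omega
        simp only [Function.comp_apply]
        congr 2
        rw [PySem.List.slice_toNat _ (by omega) (by omega),
            PySem.List.slice_toNat _ hi0 (by omega), hdd, List.drop_drop]
        congr 1
        · omega
        · congr 1; omega
      rw [hmapeq]
      have hdpos : 0 < d.length := List.length_pos_iff.mpr hd
      have htailne : ((PySem.List.pyRange 0 (d.length : Int) p).map (fun i =>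
            PySem.Chars.join [' '] (pvBlockFix p (PySem.List.slice d (some i) (some (i + p)))))) ≠ [] := by
        rw [pvRange_cons 0 _ p hp (by exact_mod_cast hdpos)]
        simp
      rw [pvJoin_cons _ _ _ htailne, ih d (by omega) hd]
      -- right-hand side: split the marking at the block boundary
      conv_rhs => rw [← List.take_append_drop p.toNat words, ← ht, ← hdd]
      rw [pvMark_append, htlen, show (0 + p.toNat) = 0 + p.toNat from rfl, pvMark_shift p hp,
          pvJoin_append [' '] _ _ (by rw [← List.length_pos_iff, pvMark_length]; omega)
            (by rw [← List.length_pos_iff, pvMark_length]; omega),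
          pvBlockFix_eq_mark p hp t (le_of_eq htlen)]

lemma pvMark_cons (p : Int) (k : Nat) (w : List Char) (l : List (List Char)) :
    pvMark p k (w :: l) =
      (if pvEndsP w && (PySem.Int.mod ((k + 1 : Nat) : Int) p == 0) then w ++ ['\n'] else w)
        :: pvMark p (k+1) l := by
  simp [pvMark, List.zipIdx_cons]

-- once A's pattern is fixed at pat, its loop just appends the marked words
lemma pvFoldSome (l : List (List Char)) (pat : Int) :
    ∀ (k : Nat) (acc : List (List Char)),
      l.foldl pvStepA (some pat, acc, (k : Int)) =
        (some pat, acc ++ pvMark pat k l, (k : Int) + l.length) := by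
  induction l with
  | nil => intro k acc; simp [pvMark]
  | cons w l ih =>
    intro k acc
    rw [List.foldl_cons, pvMark_cons]
    have hcast : ((k + 1 : Nat) : Int) = ((k : Int) + 1) := by push_cast; ring
    have hstep : pvStepA (some pat, acc, (k : Int)) w =
        (some pat,
         acc ++ [if pvEndsP w && (PySem.Int.mod ((k + 1 : Nat) : Int) pat == 0)
                 then w ++ ['\n'] else w],
         ((k + 1 : Nat) : Int)) := by
      unfold pvStepA
      cases h : pvEndsP w with
      | false =>
        rw [if_neg (by simp)]
        simp only [Bool.false_and, if_neg Bool.false_ne_true, hcast]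
      | true =>
        rw [if_pos (by simp)]
        simp only [Bool.true_and, hcast]
        by_cases hm : PySem.Int.mod ((k : Int) + 1) pat = 0
        · rw [if_pos hm, if_pos (by simpa using hm)]
        · rw [if_neg hm, if_neg (by simpa using hm)]
    rw [hstep, ih (k + 1) (acc ++ [_])]
    rw [List.append_assoc]
    refine congrArg (fun z => (some pat, acc ++ ([_] ++ pvMark pat (k+1) l), z)) ?_
    simp only [List.length_cons]; push_cast; ring

-- before the pattern is fixed: if pat matches the first punctuated position, same marked words
lemma pvFoldNone (l : List (List Char)) (pat : Int) :
    ∀ (k : Nat) (acc : List (List Char)),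
      (pvLead l < l.length → pat = (if k + pvLead l + 1 = 5 then 5 else 7)) →
      ∃ p', l.foldl pvStepA (none, acc, (k : Int)) =
        (p', acc ++ pvMark pat k l, (k : Int) + l.length) := by
  induction l with
  | nil => intro k acc _; exact ⟨none, by simp [pvMark]⟩
  | cons w l ih =>
    intro k acc hpat
    rw [List.foldl_cons, pvMark_cons]
    have hcast : ((k + 1 : Nat) : Int) = ((k : Int) + 1) := by push_cast; ring
    cases h : pvEndsP w with
    | false =>
      have hstep : pvStepA (none, acc, (k : Int)) w = (none, acc ++ [w], ((k + 1 : Nat) : Int)) := by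
        unfold pvStepA
        rw [if_neg (by simp [h]), hcast]
      have hpat' : pvLead l < l.length → pat = (if (k + 1) + pvLead l + 1 = 5 then 5 else 7) := by
        intro hlt
        have hL : pvLead (w :: l) = pvLead l + 1 := by simp [pvLead, h]
        have := hpat (by simp [hL]; omega)
        rw [hL] at this
        rw [this]
        by_cases h5 : k + 1 + pvLead l + 1 = 5
        · rw [if_pos (by omega), if_pos h5]
        · rw [if_neg (by omega), if_neg h5]
      obtain ⟨p', hp⟩ := ih (k + 1) (acc ++ [w]) hpat'
      refine ⟨p', ?_⟩
      rw [hstep, hp, List.append_assoc]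
      have hlen : ((k + 1 : Nat) : Int) + (l.length : Int) = (k : Int) + ((w :: l).length : Int) := by
        simp only [List.length_cons]; push_cast; ring
      rw [hlen]
      simp
    | true =>
      have hL : pvLead (w :: l) = 0 := by simp [pvLead, h]
      have hpat0 : pat = (if k + 1 = 5 then 5 else 7) := by
        have := hpat (by simp [hL])
        rw [hL] at this
        simpa using this
      have hchoose :
          (if ((k : Int) + 1) = 7 then (7 : Int) else if ((k : Int) + 1) = 5 then 5 else 7) = pat := by
        rw [hpat0]
        by_cases h5 : k + 1 = 5
        · rw [if_pos h5, if_neg (by omega), if_pos (by exact_mod_cast congrArg (Nat.cast : Nat → Int) h5)]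
        · rw [if_neg h5]
          by_cases h7 : k + 1 = 7
          · rw [if_pos (by exact_mod_cast congrArg (Nat.cast : Nat → Int) h7)]
          · rw [if_neg (by omega), if_neg (by omega)]
      have hstep : pvStepA (none, acc, (k : Int)) w =
          (some pat,
           acc ++ [if pvEndsP w && (PySem.Int.mod ((k + 1 : Nat) : Int) pat == 0)
                   then w ++ ['\n'] else w],
           ((k + 1 : Nat) : Int)) := by
        simp only [pvStepA, h, if_true, hcast, Bool.true_and]
        rw [hchoose]
        by_cases hm : PySem.Int.mod ((k : Int) + 1) pat = 0
        · rw [if_pos hm, if_pos (by simpa using hm)]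
        · rw [if_neg hm, if_neg (by simpa using hm)]
      rw [hstep, pvFoldSome l pat (k + 1) (acc ++ [_]), List.append_assoc]
      have hlen : ((k + 1 : Nat) : Int) + (l.length : Int) = (k : Int) + ((w :: l).length : Int) := by
        simp only [List.length_cons]; push_cast; ring
      rw [hlen]
      exact ⟨some pat, by simp [h]⟩

-- per line, A's accumulated words are the marked words under B's pattern
lemma pvLine (words : List (List Char)) :
    (words.foldl pvStepA (none, [], 0)).2.1 =
      pvMark (if pvLead words = 4 then 5 else 7) 0 words := by
  set pat : Int := if pvLead words = 4 then 5 else 7 with hpatdef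
  have hpat : pvLead words < words.length → pat = (if 0 + pvLead words + 1 = 5 then 5 else 7) := by
    intro _
    rw [hpatdef]
    by_cases h4 : pvLead words = 4
    · rw [if_pos h4, if_pos (by omega)]
    · rw [if_neg h4, if_neg (by omega)]
  obtain ⟨p', hp⟩ := pvFoldNone words pat 0 [] hpat
  have h0 : words.foldl pvStepA (none, [], 0) = (p', [] ++ pvMark pat 0 words, (0 : Int) + words.length) := by
    simpa using hp
  rw [h0]
  simp

-- ===== VERDICT (by name: the statement is the Claim_ definition above) =====
set_option maxHeartbeats 1000000 in
theorem postprocess_poem_spec : Claim_equal_postprocess_poem := by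
  intro text _
  unfold Spec_postprocess_poem postprocess_poem postprocess_poem_alt
  have hgen : ∀ (ts : List String) (acc : List String),
      ts.foldl (fun processed_lines line =>
        let words := PySem.Chars.split₀ (PySem.Chars.strip line.toList)
        if words = [] then processed_lines ++ [line]
        else
          let res := words.foldl pvStepA (none, [], 0)
          processed_lines ++ [String.ofList (PySem.Chars.join [' '] res.2.1)]) acc =
      ts.foldl (fun processed_lines line =>
        let words := PySem.Chars.split₀ (PySem.Chars.strip line.toList)
        if words = [] then processed_lines ++ [line]
        else
          let pattern : Int := if pvLead words = 4 then 5 else 7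
          let pieces := (PySem.List.pyRange 0 (words.length : Int) pattern).foldl
            (fun pieces i =>
              pieces ++ [PySem.Chars.join [' ']
                (pvBlockFix pattern (PySem.List.slice words (some i) (some (i + pattern))))]) []
          processed_lines ++ [String.ofList (PySem.Chars.join [' '] pieces)]) acc := by
    intro ts
    induction ts with
    | nil => intro acc; rfl
    | cons t ts ih =>
      intro acc
      rw [List.foldl_cons, List.foldl_cons, ih]
      congr 1
      by_cases h : PySem.Chars.split₀ (PySem.Chars.strip t.toList) = []
      · simp [h]
      · simp only [if_neg h]
        congr 2
        set pat : Int := if pvLead (PySem.Chars.split₀ (PySem.Chars.strip t.toList)) = 4 then 5 else 7 with hpat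
        have hppos : 0 < pat := by
          rw [hpat]; split_ifs <;> norm_num
        rw [pvLine, PySem.List.foldl_append_singleton_eq_map, List.nil_append,
            pvKey pat hppos _ _ le_rfl h]
  rw [hgen]
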